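-- pv_equiv track=rewrite | github.com/letgodchan0/Al_Is_Well | 5주차/0703/윤규/괄호변환.py | solution
-- ===== SOURCE A (Python) =====
-- def divide(w):
--     check1 = 0
--     check2 = 0
--     for i in range(len(w)):
--         if w[i] == "(":
--             check1 += 1
--         elif w[i] == ")":
--             check2 += 1
--         if check1 == check2:
--             u = w[:i+1]
--             v = w[i+1:]
--             break
--     return u, v
--
-- def right(w):
--     check1 = 0
--     check2 = 0
--     for i in range(len(w)):
--         if w[i] == "(":
--             check1 += 1
--         elif w[i] == ")":
--             check2 += 1
--         if check1 < check2:
--             return 0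
--     return 1
--
-- def solution(p):
--     answer = ''
--     if p == '':
--         return ''
--     else:
--         u, v = divide(p)
--         if right(u):
--             return u + solution(v)
--         if not right(u):
--             u = u[1:-1]
--             newu = ''
--             for i in range(len(u)):
--                 if u[i] == '(':
--                     newu += ')'
--                 elif u[i] == ')':
--                     newu += '('
--             return "(" + solution(v) + ")" + newu
--
--     return answer
-- ===== SOURCE B (Python) =====
-- def solution(p):
--     out = []
--     tails = []  # deferred ')'+flipped-middle pieces, appended innermost-last
--     i = 0
--     n = len(p)
--     while i < n:
--         bal = 0
--         ok = True
--         j = i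
--         while True:
--             c = p[j]
--             if c == '(':
--                 bal += 1
--             elif c == ')':
--                 bal -= 1
--                 if bal < 0:
--                     ok = False
--             j += 1
--             if bal == 0 or j == n:
--                 break
--         if ok:
--             out.append(p[i:j])
--         else:
--             out.append('(')
--             tail = [')']
--             for c in p[i + 1:j - 1]:
--                 if c == '(':
--                     tail.append(')')
--                 elif c == ')':
--                     tail.append('(')
--             tails.append(''.join(tail))
--         i = j
--     while tails:
--         out.append(tails.pop())
--     return ''.join(out)
-- ===== Notes on version B (the rewrite author's own statement) =====
-- stated objective: faster
-- what changed: A scans each level twice (divide counts, then right rescans u) and rebuilds strings by slicing and repeated concatenation; B does one scan per level with a balance counter that finds the split point and the correctness flag simultaneously, and appends into a single output list accumulator.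
-- outside the precondition, e.g. on solution('('): A raises UnboundLocalError, B returns '('; on solution(')'): A raises UnboundLocalError, B returns '()'
import Mathlib
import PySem

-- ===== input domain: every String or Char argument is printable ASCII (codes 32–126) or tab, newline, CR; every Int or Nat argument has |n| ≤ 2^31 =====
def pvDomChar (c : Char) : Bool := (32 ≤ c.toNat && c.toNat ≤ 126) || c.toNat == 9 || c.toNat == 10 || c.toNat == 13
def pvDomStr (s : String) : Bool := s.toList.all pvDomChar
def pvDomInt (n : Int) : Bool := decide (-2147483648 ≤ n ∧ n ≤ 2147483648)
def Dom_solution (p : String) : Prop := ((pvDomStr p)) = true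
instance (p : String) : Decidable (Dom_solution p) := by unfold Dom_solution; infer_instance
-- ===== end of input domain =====

-- B replaces A's per-level double scan (divide + right), recursion and repeated string
-- concatenation by one iterative left-to-right pass with a balance counter: each segment's
-- split point and correctness flag come from a single scan, output pieces go into one
-- accumulator, and the deferred ')'+flipped-middle pieces live on an explicit stack.
-- ===== PORT A =====
-- A's divide: scan w, counting '(' in check1 and ')' in check2, break at the first
-- index where check1 == check2; returns none exactly where Python raises UnboundLocalError.
def divideGo (acc : List Char) (w : List Char) (c1 c2 : Int) :
    Option (List Char × List Char) :=
  match w with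
  | [] => none
  | c :: rest =>
    let c1 := if c = '(' then c1 + 1 else c1
    let c2 := if c ≠ '(' ∧ c = ')' then c2 + 1 else c2
    if c1 = c2 then some (acc ++ [c], rest)
    else divideGo (acc ++ [c]) rest c1 c2

-- A's right: returns false (0) at the first prefix with check1 < check2, else true (1).
def rightGo (w : List Char) (c1 c2 : Int) : Bool :=
  match w with
  | [] => true
  | c :: rest =>
    let c1 := if c = '(' then c1 + 1 else c1
    let c2 := if c ≠ '(' ∧ c = ')' then c2 + 1 else c2
    if c1 < c2 then false else rightGo rest c1 c2

-- A's reversal loop: newu = '' ; for each char append the flipped bracket (others dropped).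
def flipA (u : List Char) : List Char :=
  u.foldl (fun newu c =>
    if c = '(' then newu ++ [')'] else if c = ')' then newu ++ ['('] else newu) []

-- A's recursion, with fuel = length of the original string (each level consumes ≥ 1 char).
def solA (fuel : Nat) (p : List Char) : List Char :=
  match fuel with
  | 0 => []
  | fuel + 1 =>
    if p = [] then []
    else
      match divideGo [] p 0 0 with
      | none => []   -- Python raises UnboundLocalError here; excluded by Pre_solution
      | some (u, v) =>
        if rightGo u 0 0 then u ++ solA fuel v
        else
          let u' := PySem.List.slice u (some 1) (some (-1))
          '(' :: solA fuel v ++ ')' :: flipA u'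

def solution (p : String) : String := String.ofList (solA p.toList.length p.toList)

-- ===== PORT B =====
-- B's inner while: walks the current suffix once updating the balance and the ok flag,
-- stops after the char that makes the balance 0 (or at the end); returns (chars consumed, ok).
def scanB (s : List Char) (bal : Int) (ok : Bool) (n : Nat) : Nat × Bool :=
  match s with
  | [] => (n, ok)
  | c :: rest =>
    let bal := if c = '(' then bal + 1 else if c = ')' then bal - 1 else bal
    let ok := if c = ')' ∧ bal < 0 then false else ok
    if bal = 0 then (n + 1, ok) else scanB rest bal ok (n + 1)

-- B's final while: pop the tail stack (head = top) onto the output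
def popTails (tails : List (List Char)) (out : List Char) : List Char :=
  match tails with
  | [] => out
  | t :: ts => popTails ts (out ++ t)

-- B's outer while over the remaining suffix, threading the output accumulator and the
-- stack of deferred tails
def goB (fuel : Nat) (s : List Char) (out : List Char) (tails : List (List Char)) :
    List Char :=
  match fuel with
  | 0 => popTails tails out
  | fuel + 1 =>
    if s = [] then popTails tails out
    else
      let (n, ok) := scanB s 0 true 0
      let u := s.take n
      let v := s.drop n
      if ok then goB fuel v (out ++ u) tails
      else
        let tail := (PySem.List.slice u (some 1) (some (-1))).foldl
          (fun t c => if c = '(' then t ++ [')'] else if c = ')' then t ++ ['('] else t) [')']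
        goB fuel v (out ++ ['(']) (tail :: tails)

def solution_alt (p : String) : String := String.ofList (goB p.toList.length p.toList [] [])

-- ===== PRECONDITION & SPEC =====
-- Pre_ excludes exactly the strings whose '(' and ')' counts differ: on those A's
-- divide eventually finds no split and Python raises UnboundLocalError.
def Pre_solution (p : String) : Prop := p.toList.count '(' = p.toList.count ')'
instance (p : String) : Decidable (Pre_solution p) := by unfold Pre_solution; infer_instance
def pvWitness_solution : String := "()(a)"

def Spec_solution (p : String) (out : String) : Prop := out = solution_alt p
instance (p : String) (out : String) : Decidable (Spec_solution p out) := by unfold Spec_solution; infer_instance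

-- ===== CLAIM (what is proved, stated in full; the proofs are below) =====
def Claim_equal_solution : Prop := ∀ (p : String), Dom_solution p → Pre_solution p → Spec_solution p (solution p)

-- ===== LEMMAS AND PROOFS =====

-- balance step
def pvStep (b : Int) (c : Char) : Int := if c = '(' then b + 1 else if c = ')' then b - 1 else b

-- canonical split point: number of chars (≥ 1) up to and including the first one
-- after which the running balance is 0; none if the balance never returns to 0
def pvSplit? (s : List Char) (b : Int) : Option Nat :=
  match s with
  | [] => none
  | c :: rest =>
    if pvStep b c = 0 then some 1 else (pvSplit? rest (pvStep b c)).map (· + 1)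

-- "balance never negative" over a whole scan, as A's right computes it
def pvOk (s : List Char) (b : Int) : Bool :=
  match s with
  | [] => true
  | c :: rest => if pvStep b c < 0 then false else pvOk rest (pvStep b c)

theorem divideGo_eq (s : List Char) : ∀ (acc : List Char) (c1 c2 : Int),
    divideGo acc s c1 c2 =
      (pvSplit? s (c1 - c2)).map (fun n => (acc ++ s.take n, s.drop n)) := by
  induction s with
  | nil => intro acc c1 c2; simp [divideGo, pvSplit?]
  | cons c rest ih =>
    intro acc c1 c2
    have hstep : ((if c = '(' then c1 + 1 else c1) - if c ≠ '(' ∧ c = ')' then c2 + 1 else c2)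
        = pvStep (c1 - c2) c := by
      unfold pvStep; split_ifs with h1 h2 h3 h4 h5 <;> simp_all <;> omega
    have hcond : ((if c = '(' then c1 + 1 else c1) = if c ≠ '(' ∧ c = ')' then c2 + 1 else c2)
        ↔ pvStep (c1 - c2) c = 0 := by constructor <;> intro h <;> omega
    simp only [divideGo, pvSplit?]
    rw [ih, hstep, if_congr hcond rfl rfl]
    by_cases hz : pvStep (c1 - c2) c = 0
    · simp [hz]
    · rw [if_neg hz, if_neg hz]
      cases pvSplit? rest (pvStep (c1 - c2) c) <;> simp

theorem rightGo_eq (s : List Char) : ∀ (c1 c2 : Int),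
    rightGo s c1 c2 = pvOk s (c1 - c2) := by
  induction s with
  | nil => intro c1 c2; simp [rightGo, pvOk]
  | cons c rest ih =>
    intro c1 c2
    have hstep : ((if c = '(' then c1 + 1 else c1) - if c ≠ '(' ∧ c = ')' then c2 + 1 else c2)
        = pvStep (c1 - c2) c := by
      unfold pvStep; split_ifs with h1 h2 h3 h4 h5 <;> simp_all <;> omega
    have hcond : ((if c = '(' then c1 + 1 else c1) < if c ≠ '(' ∧ c = ')' then c2 + 1 else c2)
        ↔ pvStep (c1 - c2) c < 0 := by constructor <;> intro h <;> omega
    simp only [rightGo, pvOk]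
    rw [ih, hstep, if_congr hcond rfl rfl]

-- B's ok flag as a pure scan of a prefix (false iff some ')' step makes the balance negative)
def pvOkB (s : List Char) (b : Int) : Bool :=
  match s with
  | [] => true
  | c :: rest => (!(c = ')' ∧ pvStep b c < 0)) && pvOkB rest (pvStep b c)

-- B's scan: consumed count is the split point (or all of s), ok is B's flag over the
-- consumed prefix, and-ed onto the incoming ok
theorem scanB_eq (s : List Char) : ∀ (b : Int) (ok : Bool) (n : Nat),
    scanB s b ok n =
      (match pvSplit? s b with
       | some k => (n + k, ok && pvOkB (s.take k) b)
       | none => (n + s.length, ok && pvOkB s b)) := by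
  induction s with
  | nil => intro b ok n; simp [scanB, pvSplit?, pvOkB]
  | cons c rest ih =>
    intro b ok n
    simp only [scanB, pvSplit?]
    rw [show (if c = '(' then b + 1 else if c = ')' then b - 1 else b) = pvStep b c from rfl]
    have hok : (if c = ')' ∧ pvStep b c < 0 then false else ok)
        = (ok && !(c = ')' ∧ pvStep b c < 0)) := by
      by_cases h : c = ')' ∧ pvStep b c < 0
      · obtain ⟨h1, h2⟩ := h
        subst h1
        simp [h2]
      · simp [h]
    rw [hok]
    by_cases hz : pvStep b c = 0
    · rw [if_pos hz, if_pos hz]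
      simp [pvOkB]
    · rw [if_neg hz, if_neg hz, ih]
      cases h : pvSplit? rest (pvStep b c) with
      | none => simp [pvOkB, Bool.and_assoc]; omega
      | some k => simp [pvOkB, Bool.and_assoc, List.take_succ_cons]; omega

-- starting from a nonnegative balance, B's flag agrees with A's right
theorem pvOkB_eq_pvOk (s : List Char) : ∀ b : Int, 0 ≤ b → pvOkB s b = pvOk s b := by
  induction s with
  | nil => intro b _; rfl
  | cons c rest ih =>
    intro b hb
    simp only [pvOkB, pvOk]
    by_cases hneg : pvStep b c < 0
    · have hc : c = ')' := by
        unfold pvStep at hneg; split_ifs at hneg with h1 h2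
        · omega
        · exact h2
        · omega
      subst hc
      rw [if_pos hneg]
      simp [hneg]
    · have hb' : 0 ≤ pvStep b c := by omega
      rw [if_neg hneg, ih _ hb']
      simp [hneg]

-- the split point is ≥ 1 and ≤ length
theorem pvSplit?_pos {s : List Char} {b : Int} {k : Nat} (h : pvSplit? s b = some k) :
    1 ≤ k ∧ k ≤ s.length := by
  induction s generalizing b k with
  | nil => simp [pvSplit?] at h
  | cons c rest ih =>
    simp only [pvSplit?] at h
    split_ifs at h with hz
    · cases h; simp
    · cases hk : pvSplit? rest (pvStep b c) with
      | none => rw [hk] at h; simp at h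
      | some m =>
        rw [hk] at h; simp at h
        have := ih hk
        simp [List.length]; omega

-- running balance = foldl of pvStep; counts of brackets determine it
theorem foldl_step_append (l1 l2 : List Char) (b : Int) :
    List.foldl pvStep b (l1 ++ l2) = List.foldl pvStep (List.foldl pvStep b l1) l2 :=
  List.foldl_append

theorem foldl_step_count (s : List Char) : ∀ b : Int,
    List.foldl pvStep b s = b + s.count '(' - s.count ')' := by
  induction s with
  | nil => intro b; simp
  | cons c rest ih =>
    intro b
    simp only [List.foldl, ih, List.count_cons]
    unfold pvStep
    split_ifs with h1 h2 <;> simp_all <;> omega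

-- if the whole scan returns to 0 and s ≠ [], a split exists
theorem pvSplit?_isSome (s : List Char) : ∀ b : Int, s ≠ [] →
    List.foldl pvStep b s = 0 → (pvSplit? s b).isSome := by
  induction s with
  | nil => intro b h; simp at h
  | cons c rest ih =>
    intro b _ hbal
    simp only [pvSplit?]
    by_cases hz : pvStep b c = 0
    · simp [hz]
    · rw [if_neg hz]
      have hrest : rest ≠ [] := by rintro rfl; simp [List.foldl] at hbal; exact hz hbal
      have := ih (pvStep b c) hrest (by simpa [List.foldl] using hbal)
      cases h : pvSplit? rest (pvStep b c) <;> simp_all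

-- the prefix up to the split point scans back to 0
theorem pvSplit?_take_bal (s : List Char) : ∀ (b : Int) (k : Nat),
    pvSplit? s b = some k → List.foldl pvStep b (s.take k) = 0 := by
  induction s with
  | nil => intro b k h; simp [pvSplit?] at h
  | cons c rest ih =>
    intro b k h
    simp only [pvSplit?] at h
    split_ifs at h with hz
    · cases h; simpa [List.foldl]
    · cases hk : pvSplit? rest (pvStep b c) with
      | none => rw [hk] at h; simp at h
      | some m =>
        rw [hk] at h; simp at h
        subst h
        simpa [List.foldl] using ih _ _ hk

-- any accumulator: B's flip fold is the accumulator followed by A's flipA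
theorem flip_foldl (u : List Char) : ∀ out : List Char,
    u.foldl (fun o c => if c = '(' then o ++ [')'] else if c = ')' then o ++ ['('] else o) out
      = out ++ flipA u := by
  have key : ∀ (u : List Char) (acc : List Char),
      u.foldl (fun o c => if c = '(' then o ++ [')'] else if c = ')' then o ++ ['('] else o) acc
        = acc ++ u.foldl (fun o c => if c = '(' then o ++ [')'] else if c = ')' then o ++ ['('] else o) [] := by
    intro u
    induction u with
    | nil => intro acc; simp
    | cons c rest ih =>
      intro acc
      simp only [List.foldl]
      rw [ih, ih (if c = '(' then [] ++ [')'] else if c = ')' then [] ++ ['('] else [])]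
      split_ifs <;> simp
  intro out; rw [key]; rfl

-- B's final while flattens the stack onto the output
theorem popTails_eq (tails : List (List Char)) : ∀ out : List Char,
    popTails tails out = out ++ tails.flatten := by
  induction tails with
  | nil => intro out; simp [popTails]
  | cons t ts ih => intro out; simp [popTails, ih]

-- main equivalence: B's iterative loop with the tail stack computes out ++ A's
-- recursive result ++ the flattened stack, on balanced input with enough fuel
theorem go_eq (fuel1 : Nat) : ∀ (fuel2 : Nat) (s out : List Char) (tails : List (List Char)),
    s.length ≤ fuel1 → s.length ≤ fuel2 →
    List.foldl pvStep 0 s = 0 →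
    goB fuel1 s out tails = out ++ solA fuel2 s ++ tails.flatten := by
  induction fuel1 with
  | zero =>
    intro fuel2 s out tails h1 _ _
    have : s = [] := List.eq_nil_of_length_eq_zero (by omega)
    subst this
    cases fuel2 <;> simp [goB, solA, popTails_eq]
  | succ fuel ih =>
    intro fuel2 s out tails h1 h2 hbal
    by_cases hs : s = []
    · subst hs; cases fuel2 <;> simp [goB, solA, popTails_eq]
    · cases fuel2 with
      | zero => exact absurd h2 (by simpa [Nat.le_zero, List.length_eq_zero_iff] using hs)
      | succ fuel2 =>
        obtain ⟨k, hk⟩ := Option.isSome_iff_exists.mp (pvSplit?_isSome s 0 hs hbal)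
        obtain ⟨hk1, hklen⟩ := pvSplit?_pos hk
        have htake : List.foldl pvStep 0 (s.take k) = 0 := pvSplit?_take_bal s 0 k hk
        have hdrop : List.foldl pvStep 0 (s.drop k) = 0 := by
          have := foldl_step_append (s.take k) (s.drop k) 0
          rw [List.take_append_drop] at this
          rw [hbal, htake] at this
          omega
        have hdroplen : (s.drop k).length ≤ fuel := by
          rw [List.length_drop]; omega
        have hdroplen2 : (s.drop k).length ≤ fuel2 := by
          rw [List.length_drop]; omega
        have hscan : scanB s 0 true 0 = (k, pvOk (s.take k) 0) := by
          rw [scanB_eq, hk]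
          simp [pvOkB_eq_pvOk (s.take k) 0 le_rfl]
        have hdiv : divideGo [] s 0 0 = some (s.take k, s.drop k) := by
          rw [divideGo_eq]
          simp [hk]
        have hright : rightGo (s.take k) 0 0 = pvOk (s.take k) 0 := by
          simpa using rightGo_eq (s.take k) 0 0
        simp only [goB, solA, if_neg hs, hscan, hdiv, hright]
        by_cases hok : pvOk (s.take k) 0 = true
        · rw [if_pos hok, if_pos hok, ih fuel2 _ _ _ hdroplen hdroplen2 hdrop]
          simp
        · rw [if_neg hok, if_neg hok, flip_foldl]
          rw [ih fuel2 _ _ _ hdroplen hdroplen2 hdrop]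
          simp

-- ===== VERDICT (by name: the statement is the Claim_ definition above) =====
theorem solution_spec : Claim_equal_solution := by
  intro p _ hpre
  unfold Spec_solution solution solution_alt
  have hbal : List.foldl pvStep 0 p.toList = 0 := by
    rw [foldl_step_count]
    unfold Pre_solution at hpre
    omega
  rw [go_eq p.toList.length p.toList.length p.toList [] [] le_rfl le_rfl hbal]
  simp
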